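-- pv_equiv track=rewrite | github.com/Art3mlss/AdventOfCode2024 | Source/day9.py | findFirstBlock
-- ===== SOURCE A (Python) =====
-- def findFirstBlock(freeIndexes, length):
--     # Find the first block of free consecutive indexes of a given length
--
--     blockLength = 0
--     firstIndex = 0
--     for i, elem in enumerate(freeIndexes):
--         if i==0:
--             blockLength = 1
--             firstIndex = elem
--         else:
--             if elem == freeIndexes[i-1]+1:
--                 blockLength += 1
--             else:
--                 blockLength = 1
--                 firstIndex = elem
--
--         if blockLength == length:
--             return firstIndex
--
--     return -1
-- ===== SOURCE B (Python) =====
-- def findFirstBlock(freeIndexes, length):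
--     # Build a table of maximal consecutive runs (startValue, runLength), then
--     # return the start of the first run long enough (different decomposition).
--     runs = []
--     for x in freeIndexes:
--         if runs and x == runs[-1][0] + runs[-1][1]:
--             runs[-1] = (runs[-1][0], runs[-1][1] + 1)
--         else:
--             runs.append((x, 1))
--     if length >= 1:
--         for start, runLength in runs:
--             if runLength >= length:
--                 return start
--     return -1
-- ===== Notes on version B (the rewrite author's own statement) =====
-- stated objective: alternative
-- what changed: Replaces the inline counter/firstIndex state machine with two passes: build a table of maximal consecutive runs (start, length), then scan it for the first run at least as long as requested (with an explicit length >= 1 guard).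
import Mathlib
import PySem

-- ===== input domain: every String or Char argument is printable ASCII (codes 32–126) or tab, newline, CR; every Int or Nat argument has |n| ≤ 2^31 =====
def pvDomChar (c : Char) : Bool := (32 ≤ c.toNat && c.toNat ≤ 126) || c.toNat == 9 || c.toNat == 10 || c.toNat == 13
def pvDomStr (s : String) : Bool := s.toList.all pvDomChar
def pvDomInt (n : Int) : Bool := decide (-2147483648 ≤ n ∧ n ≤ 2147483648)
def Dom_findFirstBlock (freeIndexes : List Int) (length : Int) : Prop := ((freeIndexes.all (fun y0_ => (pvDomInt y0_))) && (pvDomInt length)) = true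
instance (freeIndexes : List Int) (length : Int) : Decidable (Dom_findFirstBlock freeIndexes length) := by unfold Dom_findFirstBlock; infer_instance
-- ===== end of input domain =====

-- B replaces A's inline counter/firstIndex state machine by an explicit runs table
-- (build maximal consecutive runs, then scan for the first long-enough one); objective: alternative decomposition.

-- ===== PORT A =====
-- enumerate(freeIndexes), transliterated
def pyEnumFrom (k : Int) : List Int → List (Int × Int)
  | [] => []
  | x :: xs => (k, x) :: pyEnumFrom (k + 1) xs

-- the for-loop of A; `pyGet? full (i-1)` is `freeIndexes[i-1]` (always in range when i ≥ 1)
def goA (full : List Int) (blockLength firstIndex length : Int) : List (Int × Int) → Int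
  | [] => -1
  | (i, elem) :: rest =>
    let st : Int × Int :=
      if i = 0 then (1, elem)
      else if (PySem.List.pyGet? full (i - 1)).map (· + 1) = some elem then
        (blockLength + 1, firstIndex)
      else (1, elem)
    if st.1 = length then st.2 else goA full st.1 st.2 length rest

def findFirstBlock (freeIndexes : List Int) (length : Int) : Int :=
  goA freeIndexes 0 0 length (pyEnumFrom 0 freeIndexes)

-- ===== PORT B =====
-- one step of B's first loop: extend the last run or append a new one
def addRun (runs : List (Int × Int)) (x : Int) : List (Int × Int) :=
  match runs.getLast? with
  | some (s, c) => if x = s + c then runs.dropLast ++ [(s, c + 1)] else runs ++ [(x, 1)]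
  | none => [(x, 1)]

-- B's second loop: first run of length ≥ length
def scanRuns (length : Int) : List (Int × Int) → Int
  | [] => -1
  | (s, c) :: rs => if length ≤ c then s else scanRuns length rs

def findFirstBlock_alt (freeIndexes : List Int) (length : Int) : Int :=
  let runs := freeIndexes.foldl addRun []
  if 1 ≤ length then scanRuns length runs else -1

-- ===== PRECONDITION & SPEC =====
def Spec_findFirstBlock (freeIndexes : List Int) (length : Int) (out : Int) : Prop := out = findFirstBlock_alt freeIndexes length
instance (freeIndexes : List Int) (length : Int) (out : Int) : Decidable (Spec_findFirstBlock freeIndexes length out) := by unfold Spec_findFirstBlock; infer_instance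

-- ===== CLAIM (what is proved, stated in full; the proofs are below) =====
def Claim_equal_findFirstBlock : Prop := ∀ (freeIndexes : List Int) (length : Int), Dom_findFirstBlock freeIndexes length → Spec_findFirstBlock freeIndexes length (findFirstBlock freeIndexes length)

-- ===== LEMMAS AND PROOFS =====

-- runs of a list continuing an open run (s, c)
def Rr (s c : Int) : List Int → List (Int × Int)
  | [] => [(s, c)]
  | y :: ys => if y = s + c then Rr s (c + 1) ys else (s, c) :: Rr y 1 ys

-- A's loop rephrased to carry the previous element instead of indexing
def goP (p c s length : Int) : List Int → Int
  | [] => -1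
  | y :: ys =>
    let st : Int × Int := if y = p + 1 then (c + 1, s) else (1, y)
    if st.1 = length then st.2 else goP y st.1 st.2 length ys

theorem foldl_addRun (ys : List Int) : ∀ (rs : List (Int × Int)) (s c : Int),
    List.foldl addRun (rs ++ [(s, c)]) ys = rs ++ Rr s c ys := by
  induction ys with
  | nil => intro rs s c; simp [Rr]
  | cons y ys ih =>
    intro rs s c
    simp only [List.foldl_cons]
    by_cases h : y = s + c
    · simp [addRun, h, ih rs s (c + 1), Rr]
    · have hstep : addRun (rs ++ [(s, c)]) y = (rs ++ [(s, c)]) ++ [(y, 1)] := by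
        simp [addRun, h]
      rw [hstep, ih (rs ++ [(s, c)]) y 1]
      simp [Rr, h]

theorem Rr_head (ys : List Int) : ∀ (s c : Int),
    ∃ c' rest', Rr s c ys = (s, c') :: rest' ∧ c ≤ c' := by
  induction ys with
  | nil => intro s c; exact ⟨c, [], by simp [Rr], le_refl c⟩
  | cons y ys ih =>
    intro s c
    by_cases h : y = s + c
    · obtain ⟨c', rest', he, hc⟩ := ih s (c + 1)
      exact ⟨c', rest', by simp [Rr, h, he], by omega⟩
    · exact ⟨c, Rr y 1 ys, by simp [Rr, h], le_refl c⟩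

theorem goP_nonpos (ys : List Int) : ∀ (p c s length : Int), length ≤ 0 → 1 ≤ c →
    goP p c s length ys = -1 := by
  induction ys with
  | nil => intro p c s length _ _; rfl
  | cons y ys ih =>
    intro p c s length hl hc
    simp only [goP]
    by_cases h : y = p + 1
    · rw [if_pos h, if_neg (show ¬(((c + 1 : Int), s).1 = length) by intro hx; simp at hx; omega)]
      exact ih y (c + 1) s length hl (by omega)
    · rw [if_neg h, if_neg (show ¬(((1 : Int), y).1 = length) by intro hx; simp at hx; omega)]
      exact ih y 1 y length hl (by omega)

theorem goP_eq_scan (ys : List Int) : ∀ (s c length : Int), 1 ≤ c → c < length →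
    goP (s + c - 1) c s length ys = scanRuns length (Rr s c ys) := by
  induction ys with
  | nil =>
    intro s c length _ hlt
    simp only [goP, Rr, scanRuns]
    rw [if_neg (by omega)]
  | cons y ys ih =>
    intro s c length hc hlt
    simp only [goP, Rr]
    by_cases h : y = s + c
    · have h' : y = s + c - 1 + 1 := by omega
      rw [if_pos h, if_pos h']
      by_cases he : c + 1 = length
      · rw [if_pos he]
        obtain ⟨c', rest', heq, hc'⟩ := Rr_head ys s (c + 1)
        rw [heq]; simp only [scanRuns]
        rw [if_pos (by omega)]
      · rw [if_neg he]
        have : y = s + (c + 1) - 1 := by omega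
        rw [this, ih s (c + 1) length (by omega) (by omega)]
    · have h' : ¬ y = s + c - 1 + 1 := by omega
      rw [if_neg h, if_neg h']
      have h1 : ¬ (1 : Int) = length := by omega
      rw [if_neg h1]
      simp only [scanRuns]
      rw [if_neg (by omega)]
      have hih := ih y 1 length (by omega) (by omega)
      rw [show y + 1 - 1 = y from by omega] at hih
      exact hih

theorem bridge (ys : List Int) : ∀ (k : Nat) (full : List Int) (p c s length : Int),
    1 ≤ k → full.drop k = ys → full[k - 1]? = some p →
    goA full c s length (pyEnumFrom (k : Int) ys) = goP p c s length ys := by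
  induction ys with
  | nil => intro k full p c s length _ _ _; rfl
  | cons y ys ih =>
    intro k full p c s length hk hdrop hp
    simp only [pyEnumFrom, goA, goP]
    have hk0 : ¬ ((k : Int) = 0) := by omega
    have hcast : (k : Int) - 1 = ((k - 1 : Nat) : Int) := by omega
    have hget : PySem.List.pyGet? full ((k : Int) - 1) = some p := by
      rw [hcast, PySem.List.pyGet?_natCast, hp]
    rw [if_neg hk0, hget]
    simp only [Option.map_some, Option.some.injEq]
    have hnext : full[k]? = some y := by
      have h0 : (full.drop k)[0]? = some y := by rw [hdrop]; rfl
      rw [List.getElem?_drop] at h0; simpa using h0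
    have hdrop' : full.drop (k + 1) = ys := by
      have : full.drop (k + 1) = (full.drop k).drop 1 := by
        rw [List.drop_drop]
      rw [this, hdrop]; rfl
    have hnext' : full[(k + 1) - 1]? = some y := by simpa using hnext
    by_cases h : y = p + 1
    · have h' : p + 1 = y := h.symm
      rw [if_pos h', if_pos h]
      split
      · rfl
      · have := ih (k + 1) full y (c + 1) s length (by omega) hdrop' hnext'
        rw [show ((k : Int) + 1) = ((k + 1 : Nat) : Int) by push_cast; ring, this]
    · have h' : ¬ p + 1 = y := fun he => h he.symm
      rw [if_neg h', if_neg h]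
      split
      · rfl
      · have := ih (k + 1) full y 1 y length (by omega) hdrop' hnext'
        rw [show ((k : Int) + 1) = ((k + 1 : Nat) : Int) by push_cast; ring, this]

-- ===== VERDICT (by name: the statement is the Claim_ definition above) =====
theorem findFirstBlock_spec : Claim_equal_findFirstBlock := by
  intro freeIndexes length _
  unfold Spec_findFirstBlock findFirstBlock findFirstBlock_alt
  cases freeIndexes with
  | nil =>
    simp only [pyEnumFrom, goA, List.foldl_nil]
    split <;> rfl
  | cons x rest =>
    have hruns : (x :: rest).foldl addRun [] = Rr x 1 rest := by
      have : addRun [] x = [(x, 1)] := by rfl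
      simpa [this] using foldl_addRun rest [] x 1
    simp only [pyEnumFrom, goA, hruns, reduceIte]
    by_cases h1 : (1 : Int) = length
    · rw [if_pos h1, if_pos (by omega)]
      obtain ⟨c', rest', heq, hc'⟩ := Rr_head rest x 1
      rw [heq]; simp only [scanRuns]
      rw [if_pos (by omega)]
    · rw [if_neg h1]
      have hb : goA (x :: rest) 1 x length (pyEnumFrom ((0 : Int) + 1) rest)
          = goP x 1 x length rest := by
        have := bridge rest 1 (x :: rest) x 1 x length (by omega) (by rfl) (by simp)
        simpa using this
      rw [hb]
      by_cases hl : 1 ≤ length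
      · rw [if_pos hl]
        have hsc := goP_eq_scan rest x 1 length (by omega) (by omega)
        rw [show x + 1 - 1 = x from by omega] at hsc
        exact hsc
      · rw [if_neg hl, goP_nonpos rest x 1 x length (by omega) (by omega)]
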